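-- pv_equiv track=rewrite | github.com/chengzhi43/worldquant-alpha-aiac | backend/agents/prompts.py | build_operators_context
-- ===== SOURCE A (Python) =====
-- from typing import Dict, List, Optional
--
-- def build_operators_context(operators: List[Dict], max_ops: int = 40) -> str:
--     """Build operator reference grouped by category."""
--     if not operators:
--         return "Use standard operators."
--
--     by_category: Dict[str, List[str]] = {}
--     for op in operators[:max_ops]:
--         cat = op.get("category", "Other")
--         if cat not in by_category:
--             by_category[cat] = []
--         op_name = op.get("name", op.get("id", "unknown"))
--         by_category[cat].append(op_name)
--
--     lines = []
--     for cat, op_names in sorted(by_category.items()):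
--         lines.append(f"- {cat}: {', '.join(op_names[:10])}")
--
--     return "\n".join(lines)
-- ===== SOURCE B (Python) =====
-- def build_operators_context(operators, max_ops=40):
--     """Build operator reference grouped by category."""
--     if not operators:
--         return "Use standard operators."
--     ops = operators[:max_ops]
--     categories = sorted({op.get("category", "Other") for op in ops})
--     lines = [
--         "- {}: {}".format(
--             cat,
--             ", ".join([op.get("name", op.get("id", "unknown"))
--                        for op in ops if op.get("category", "Other") == cat][:10]),
--         )
--         for cat in categories
--     ]
--     return "\n".join(lines)
-- ===== Notes on version B (the rewrite author's own statement) =====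
-- stated objective: alternative
-- what changed: Replaces the dict-accumulate-then-sort-keys strategy with a sorted distinct-category set and one filtering comprehension per category, maintaining no intermediate map.
import Mathlib
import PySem

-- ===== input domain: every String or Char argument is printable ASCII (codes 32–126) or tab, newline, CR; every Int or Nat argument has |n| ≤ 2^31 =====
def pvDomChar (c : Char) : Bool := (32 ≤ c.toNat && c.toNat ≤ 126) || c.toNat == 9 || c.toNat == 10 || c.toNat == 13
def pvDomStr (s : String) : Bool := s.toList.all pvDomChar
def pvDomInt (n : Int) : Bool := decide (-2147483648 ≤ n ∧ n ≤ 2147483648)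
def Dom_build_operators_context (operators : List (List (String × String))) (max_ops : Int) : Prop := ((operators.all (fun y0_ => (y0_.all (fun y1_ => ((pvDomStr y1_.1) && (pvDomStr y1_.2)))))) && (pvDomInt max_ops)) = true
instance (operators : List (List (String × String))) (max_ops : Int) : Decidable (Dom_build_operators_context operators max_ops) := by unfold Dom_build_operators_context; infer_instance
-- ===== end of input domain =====

-- B replaces A's dict-accumulate-then-sort-keys strategy by a sorted distinct-category set
-- with one filtering pass per category (alternative decomposition, no intermediate map).

-- shared helpers: both Pythons call op.get(...) and format the identical line string
-- op.get(k, d) on the op dict (modelled as dict(op pairs))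
def pvGet (op : List (String × String)) (k d : String) : String :=
  (PySem.Dict.ofList op).getD k d
def pvCat (op : List (String × String)) : String := pvGet op "category" "Other"
def pvName (op : List (String × String)) : String := pvGet op "name" (pvGet op "id" "unknown")
-- the f-string "- {cat}: {', '.join(names)}"
def pvLine (cat : String) (names : List String) : String :=
  "- " ++ cat ++ ": " ++ PySem.Str.join ", " names

-- ===== PORT A =====
-- the body of A's accumulation loop (if cat not in by_category: …; by_category[cat].append(op_name))
def pvStep (d : PySem.Dict String (List String)) (op : List (String × String)) :
    PySem.Dict String (List String) :=
  let cat := pvCat op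
  let d := if d.contains cat then d else d.insert cat []
  d.modify cat [] (· ++ [pvName op])

-- sorted(by_category.items()): dict keys are unique, so Python's tuple comparison is
-- decided by the first component; ported as a stable sort keyed on the first component.
def build_operators_context (operators : List (List (String × String))) (max_ops : Int) : String :=
  if operators = [] then "Use standard operators."
  else
    let byCat : PySem.Dict String (List String) :=
      (PySem.List.slice operators none (some max_ops)).foldl pvStep PySem.Dict.empty
    let lines := (PySem.List.sorted byCat.items (fun p => p.1) false).foldl
      (fun acc p => acc ++ [pvLine p.1 (PySem.List.slice p.2 none (some 10))]) []
    PySem.Str.join "\n" lines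

-- ===== PORT B =====
def build_operators_context_alt (operators : List (List (String × String))) (max_ops : Int) : String :=
  if operators = [] then "Use standard operators."
  else
    let ops := PySem.List.slice operators none (some max_ops)
    let cats := PySem.List.sorted (PySem.Set.ofList (ops.map pvCat)) (fun c => c) false
    let lines := cats.map (fun cat =>
      pvLine cat (PySem.List.slice ((ops.filter (fun op => pvCat op == cat)).map pvName)
        none (some 10)))
    PySem.Str.join "\n" lines

-- ===== PRECONDITION & SPEC =====
def Spec_build_operators_context (operators : List (List (String × String))) (max_ops : Int) (out : String) : Prop := out = build_operators_context_alt operators max_ops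
instance (operators : List (List (String × String))) (max_ops : Int) (out : String) : Decidable (Spec_build_operators_context operators max_ops out) := by unfold Spec_build_operators_context; infer_instance

-- ===== CLAIM (what is proved, stated in full; the proofs are below) =====
def Claim_equal_build_operators_context : Prop := ∀ (operators : List (List (String × String))) (max_ops : Int), Dom_build_operators_context operators max_ops → Spec_build_operators_context operators max_ops (build_operators_context operators max_ops)

-- ===== LEMMAS AND PROOFS =====

lemma pvStep_getD (d : PySem.Dict String (List String)) (op : List (String × String))
    (c : String) :
    (pvStep d op).getD c [] =
      if c = pvCat op then d.getD c [] ++ [pvName op] else d.getD c [] := by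
  unfold pvStep
  rw [PySem.Dict.getD_modify]
  by_cases hcon : d.contains (pvCat op) = true
  · rw [if_pos hcon]
    by_cases h : c = pvCat op
    · rw [if_pos h, if_pos h, h]
    · rw [if_neg h, if_neg h]
  · have hf : d.contains (pvCat op) = false := by simpa using hcon
    rw [if_neg hcon]
    by_cases h : c = pvCat op
    · rw [if_pos h, if_pos h, h, PySem.Dict.getD_insert_self,
        PySem.Dict.getD_of_not_contains d [] hf]
    · rw [if_neg h, if_neg h, PySem.Dict.getD_insert, if_neg h]

lemma pvStep_keys (d : PySem.Dict String (List String)) (op : List (String × String)) :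
    (pvStep d op).keys = PySem.Set.add d.keys (pvCat op) := by
  unfold pvStep
  rw [PySem.Dict.keys_modify]
  by_cases hcon : d.contains (pvCat op) = true
  · have hm : pvCat op ∈ d.keys := (PySem.Dict.contains_iff_mem_keys d _).1 hcon
    rw [if_pos hcon, PySem.Dict.keys_insert_of_contains d _ hcon, PySem.Set.add_of_mem hm]
  · have hf : d.contains (pvCat op) = false := by simpa using hcon
    have hm : pvCat op ∉ d.keys := fun h => hcon ((PySem.Dict.contains_iff_mem_keys d _).2 h)
    have hc2 : (d.insert (pvCat op) []).contains (pvCat op) = true := by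
      simp
    rw [if_neg hcon, PySem.Dict.keys_insert_of_contains _ _ hc2,
      PySem.Dict.keys_insert_of_not_contains d _ hf, PySem.Set.add_of_not_mem hm]

lemma pvFold_getD (ops : List (List (String × String)))
    (d : PySem.Dict String (List String)) (c : String) :
    (ops.foldl pvStep d).getD c [] =
      d.getD c [] ++ ((ops.filter (fun op => pvCat op == c)).map pvName) := by
  induction ops generalizing d with
  | nil => simp
  | cons op ops ih =>
    simp only [List.foldl_cons, ih, pvStep_getD, List.filter_cons]
    by_cases h : c = pvCat op
    · simp [h.symm, List.append_assoc]
    · have hb : (pvCat op == c) = false := by simpa using fun e => h e.symm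
      simp [h, hb]

lemma pvFold_keys (ops : List (List (String × String)))
    (d : PySem.Dict String (List String)) :
    (ops.foldl pvStep d).keys = PySem.Set.update d.keys (ops.map pvCat) := by
  induction ops generalizing d with
  | nil => simp [PySem.Set.update_nil]
  | cons op ops ih => simp only [List.foldl_cons, List.map_cons, ih, pvStep_keys,
      PySem.Set.update_cons]

-- the sorted items of A's dict are the sorted distinct categories paired with their lookups
lemma pvSorted_items (ops : List (List (String × String))) :
    PySem.List.sorted (ops.foldl pvStep PySem.Dict.empty).items (fun p => p.1) false =
      (PySem.List.sorted (PySem.Set.ofList (ops.map pvCat)) (fun c => c) false).map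
        (fun c => (c, (ops.foldl pvStep PySem.Dict.empty).getD c [])) := by
  set D := ops.foldl pvStep PySem.Dict.empty with hD
  have hkeys : D.keys = PySem.Set.ofList (ops.map pvCat) := by
    rw [hD, pvFold_keys, PySem.Dict.keys_empty, PySem.Set.update_nil_left]
  have hnd : D.keys.Nodup := by rw [hkeys]; exact PySem.Set.nodup_ofList _
  have hitems : D.items = D.keys.map (fun c => (c, D.getD c [])) :=
    PySem.Dict.items_eq_map_keys D hnd []
  apply PySem.List.sorted_eq_of_perm_of_pairwise_lt
  · rw [hitems, ← hkeys]
    exact (PySem.List.sorted_perm D.keys (fun c => c) false).map _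
  · refine (List.pairwise_map).2 ?_
    simpa using PySem.List.sorted_ofList_pairwise_lt (ops.map pvCat)

-- ===== VERDICT (by name: the statement is the Claim_ definition above) =====
set_option maxHeartbeats 1000000 in
theorem build_operators_context_spec : Claim_equal_build_operators_context := by
  intro operators max_ops _
  unfold Spec_build_operators_context build_operators_context build_operators_context_alt
  by_cases h : operators = []
  · simp [h]
  · rw [if_neg h, if_neg h]
    simp only [PySem.List.foldl_append_singleton_eq_map, pvSorted_items, List.map_map]
    congr 1
    apply List.map_congr_left
    intro c hc
    simp only [Function.comp]
    rw [pvFold_getD, PySem.Dict.getD_empty, List.nil_append]
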